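-- pv_equiv track=rewrite | github.com/misterstab/latex-cv-translator | src/cv_translator/deepl_service.py | _restore_post_translation_exceptions
-- ===== SOURCE A (Python) =====
-- def _restore_post_translation_exceptions(text: str, escaped_amp_count: int) -> str:
--     """Restore protected characters after translation based on tracked counts."""
--
--     if escaped_amp_count <= 0:
--         return text
--
--     restored = []
--     replaced = 0
--     for char in text:
--         if char == "&" and replaced < escaped_amp_count:
--             restored.append(r"\&")
--             replaced += 1
--         else:
--             restored.append(char)
--
--     return "".join(restored)
-- ===== SOURCE B (Python) =====
-- def _restore_post_translation_exceptions(text: str, escaped_amp_count: int) -> str: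
--     """Restore protected characters after translation based on tracked counts."""
--     if escaped_amp_count <= 0:
--         return text
--     parts = text.split("&")
--     out = [parts[0]]
--     for i, part in enumerate(parts[1:], start=1):
--         out.append((r"\&" if i <= escaped_amp_count else "&") + part)
--     return "".join(out)
-- ===== Notes on version B (the rewrite author's own statement) =====
-- stated objective: faster
-- what changed: B splits the text on '&' and rejoins the chunks with a gap index, escaping the first N gaps, instead of A's character-by-character scan with a replaced-counter; the split/join bulk operations replace the per-character interpreted loop.
import Mathlib
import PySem

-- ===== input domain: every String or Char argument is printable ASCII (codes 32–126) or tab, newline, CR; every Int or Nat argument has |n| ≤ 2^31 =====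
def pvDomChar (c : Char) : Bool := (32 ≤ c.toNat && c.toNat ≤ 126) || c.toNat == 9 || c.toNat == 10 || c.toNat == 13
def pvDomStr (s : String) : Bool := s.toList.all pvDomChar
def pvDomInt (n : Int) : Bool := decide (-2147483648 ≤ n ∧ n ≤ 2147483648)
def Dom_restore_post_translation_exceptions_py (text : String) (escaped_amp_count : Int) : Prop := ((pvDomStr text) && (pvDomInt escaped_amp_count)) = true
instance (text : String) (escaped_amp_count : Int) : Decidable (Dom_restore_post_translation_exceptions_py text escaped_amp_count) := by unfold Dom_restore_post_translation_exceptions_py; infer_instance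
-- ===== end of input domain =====

-- B rebuilds the string from text.split('&') with a gap index (escaping the first N gaps)
-- instead of A's character scan with a replaced-counter; objective: alternative decomposition.


-- ===== PORT A =====
-- A's loop: scan characters, replace '&' while `replaced < escaped_amp_count`.
def pvALoop (n : Int) : List Char → Int → List Char
  | [], _ => []
  | c :: cs, r =>
    if c = '&' ∧ r < n then '\\' :: '&' :: pvALoop n cs (r + 1)
    else c :: pvALoop n cs r

def restore_post_translation_exceptions_py (text : String) (escaped_amp_count : Int) : String :=
  if escaped_amp_count ≤ 0 then text
  else String.mk (pvALoop escaped_amp_count text.toList 0)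

-- ===== PORT B =====
-- text.split('&') over the character list (always nonempty).
def pvSplitAmp : List Char → List (List Char)
  | [] => [[]]
  | c :: cs =>
    if c = '&' then [] :: pvSplitAmp cs
    else match pvSplitAmp cs with
      | p :: ps => (c :: p) :: ps
      | [] => [[c]]

-- rejoin the tail chunks, gap index i: escaped while i ≤ n.
def pvBGaps (n : Int) : List (List Char) → Int → List Char
  | [], _ => []
  | p :: ps, i => (if i ≤ n then ['\\', '&'] else ['&']) ++ p ++ pvBGaps n ps (i + 1)

def restore_post_translation_exceptions_py_alt (text : String) (escaped_amp_count : Int) : String :=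
  if escaped_amp_count ≤ 0 then text
  else match pvSplitAmp text.toList with
    | p :: ps => String.mk (p ++ pvBGaps escaped_amp_count ps 1)
    | [] => text

-- ===== PRECONDITION & SPEC =====
def Spec_restore_post_translation_exceptions_py (text : String) (escaped_amp_count : Int) (out : String) : Prop := out = restore_post_translation_exceptions_py_alt text escaped_amp_count
instance (text : String) (escaped_amp_count : Int) (out : String) : Decidable (Spec_restore_post_translation_exceptions_py text escaped_amp_count out) := by unfold Spec_restore_post_translation_exceptions_py; infer_instance

-- ===== CLAIM (what is proved, stated in full; the proofs are below) =====
def Claim_equal_restore_post_translation_exceptions_py : Prop := ∀ (text : String) (escaped_amp_count : Int), Dom_restore_post_translation_exceptions_py text escaped_amp_count → Spec_restore_post_translation_exceptions_py text escaped_amp_count (restore_post_translation_exceptions_py text escaped_amp_count)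

-- ===== LEMMAS AND PROOFS =====

theorem pvSplitAmp_ne_nil (cs : List Char) : pvSplitAmp cs ≠ [] := by
  cases cs with
  | nil => simp [pvSplitAmp]
  | cons c cs =>
    simp only [pvSplitAmp]
    split
    · simp
    · cases h : pvSplitAmp cs <;> simp

-- once the gap index is past n, it stays past n: the index value no longer matters.
theorem pvBGaps_shift (n : Int) (ps : List (List Char)) :
    ∀ i j : Int, n < i → n < j → pvBGaps n ps i = pvBGaps n ps j := by
  induction ps with
  | nil => intro i j _ _; rfl
  | cons p ps ih =>
    intro i j hi hj
    simp only [pvBGaps]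
    rw [if_neg (by omega), if_neg (by omega), ih (i + 1) (j + 1) (by omega) (by omega)]

theorem pvALoop_eq_gaps (n : Int) (cs : List Char) :
    ∀ (r : Int) (p : List Char) (ps : List (List Char)),
      pvSplitAmp cs = p :: ps → pvALoop n cs r = p ++ pvBGaps n ps (r + 1) := by
  induction cs with
  | nil =>
    intro r p ps h
    simp only [pvSplitAmp] at h
    cases h
    rfl
  | cons c cs ih =>
    intro r p ps h
    obtain ⟨q, qs, hq⟩ : ∃ q qs, pvSplitAmp cs = q :: qs := by
      cases hs : pvSplitAmp cs with
      | nil => exact absurd hs (pvSplitAmp_ne_nil cs)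
      | cons q qs => exact ⟨q, qs, rfl⟩
    by_cases hc : c = '&'
    · subst hc
      have hsplit : pvSplitAmp ('&' :: cs) = [] :: q :: qs := by
        simp [pvSplitAmp, hq]
      rw [hsplit] at h
      injection h with h1 h2
      subst h1; subst h2
      by_cases hr : r < n
      · have hA : pvALoop n ('&' :: cs) r = '\\' :: '&' :: pvALoop n cs (r + 1) := by
          simp [pvALoop, hr]
        rw [hA, ih (r + 1) q qs hq]
        simp only [pvBGaps, List.nil_append]
        rw [if_pos (by omega)]
        simp
      · have hA : pvALoop n ('&' :: cs) r = '&' :: pvALoop n cs r := by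
          simp [pvALoop, hr]
        rw [hA, ih r q qs hq]
        simp only [pvBGaps, List.nil_append]
        rw [if_neg (by omega),
          pvBGaps_shift n qs (r + 1) (r + 1 + 1) (by omega) (by omega)]
        simp
    · have hsplit : pvSplitAmp (c :: cs) = (c :: q) :: qs := by
        simp [pvSplitAmp, hc, hq]
      rw [hsplit] at h
      injection h with h1 h2
      subst h1; subst h2
      have hA : pvALoop n (c :: cs) r = c :: pvALoop n cs r := by
        simp [pvALoop, hc]
      rw [hA, ih r q qs hq]
      simp

-- ===== VERDICT (by name: the statement is the Claim_ definition above) =====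
theorem restore_post_translation_exceptions_py_spec : Claim_equal_restore_post_translation_exceptions_py := by
  intro text n _
  unfold Spec_restore_post_translation_exceptions_py
  unfold restore_post_translation_exceptions_py restore_post_translation_exceptions_py_alt
  by_cases hn : n ≤ 0
  · simp [hn]
  · rw [if_neg hn, if_neg hn]
    obtain ⟨q, qs, hq⟩ : ∃ q qs, pvSplitAmp text.toList = q :: qs := by
      cases hs : pvSplitAmp text.toList with
      | nil => exact absurd hs (pvSplitAmp_ne_nil _)
      | cons q qs => exact ⟨q, qs, rfl⟩
    rw [hq, pvALoop_eq_gaps n text.toList 0 q qs hq]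
    norm_num
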